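-- pv_equiv track=rewrite | github.com/subho004/podcast-automate | quickStart_code.py | unpack_snac_from_7
-- ===== SOURCE A (Python) =====
-- CODE_END_TOKEN_ID = 128258
--
-- CODE_TOKEN_OFFSET = 128266
--
-- SNAC_TOKENS_PER_FRAME = 7
--
-- def unpack_snac_from_7(snac_tokens: list) -> list:
--     """Unpack 7-token SNAC frames to 3 hierarchical levels."""
--     if snac_tokens and snac_tokens[-1] == CODE_END_TOKEN_ID:
--         snac_tokens = snac_tokens[:-1]
--
--     frames = len(snac_tokens) // SNAC_TOKENS_PER_FRAME
--     snac_tokens = snac_tokens[:frames * SNAC_TOKENS_PER_FRAME]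
--
--     if frames == 0:
--         return [[], [], []]
--
--     l1, l2, l3 = [], [], []
--
--     for i in range(frames):
--         slots = snac_tokens[i*7:(i+1)*7]
--         l1.append((slots[0] - CODE_TOKEN_OFFSET) % 4096)
--         l2.extend([
--             (slots[1] - CODE_TOKEN_OFFSET) % 4096,
--             (slots[4] - CODE_TOKEN_OFFSET) % 4096,
--         ])
--         l3.extend([
--             (slots[2] - CODE_TOKEN_OFFSET) % 4096,
--             (slots[3] - CODE_TOKEN_OFFSET) % 4096,
--             (slots[5] - CODE_TOKEN_OFFSET) % 4096,
--             (slots[6] - CODE_TOKEN_OFFSET) % 4096,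
--         ])
--
--     return [l1, l2, l3]
-- ===== SOURCE B (Python) =====
-- CODE_END_TOKEN_ID = 128258
--
-- CODE_TOKEN_OFFSET = 128266
--
-- SNAC_TOKENS_PER_FRAME = 7
--
-- def unpack_snac_from_7(snac_tokens: list) -> list:
--     """Unpack 7-token SNAC frames to 3 hierarchical levels (strided-slice version)."""
--     if snac_tokens and snac_tokens[-1] == CODE_END_TOKEN_ID:
--         snac_tokens = snac_tokens[:-1]
--     frames = len(snac_tokens) // SNAC_TOKENS_PER_FRAME
--     codes = [(t - CODE_TOKEN_OFFSET) % 4096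
--              for t in snac_tokens[:frames * SNAC_TOKENS_PER_FRAME]]
--     l1 = codes[0::7]
--     l2 = [c for pair in zip(codes[1::7], codes[4::7]) for c in pair]
--     l3 = [c for quad in zip(codes[2::7], codes[3::7], codes[5::7], codes[6::7]) for c in quad]
--     return [l1, l2, l3]
-- ===== Notes on version B (the rewrite author's own statement) =====
-- stated objective: idiomatic
-- what changed: replaces the per-frame loop that appends into three accumulators with a single map over the truncated token list followed by column-wise strided slices (codes[k::7]) and zip-interleaving for levels 2 and 3
import Mathlib
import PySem

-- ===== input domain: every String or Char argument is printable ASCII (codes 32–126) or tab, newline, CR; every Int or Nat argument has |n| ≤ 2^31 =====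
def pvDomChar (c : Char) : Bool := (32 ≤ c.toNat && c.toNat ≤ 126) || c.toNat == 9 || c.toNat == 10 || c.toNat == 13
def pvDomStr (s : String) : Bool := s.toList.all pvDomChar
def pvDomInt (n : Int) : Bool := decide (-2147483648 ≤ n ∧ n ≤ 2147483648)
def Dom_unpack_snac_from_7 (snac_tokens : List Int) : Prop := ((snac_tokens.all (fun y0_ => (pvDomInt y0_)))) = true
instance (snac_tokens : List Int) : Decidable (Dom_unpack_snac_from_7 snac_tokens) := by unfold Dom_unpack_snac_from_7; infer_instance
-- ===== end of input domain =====

-- B replaces A's per-frame loop with three accumulators by a single map plus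
-- column-wise strided slices (codes[k::7]) interleaved with zip (idiomatic rewrite, same cost).


-- ===== PORT A =====
-- pyGetD is used for slots[j]: inside the loop every slots has exactly 7 elements, so the
-- default is never consulted (the Python indexing never raises here).
def unpack_snac_from_7 (snac_tokens : List Int) : List (List Int) :=
  let toks : List Int :=
    if snac_tokens ≠ [] ∧ PySem.List.pyGetD snac_tokens (-1) 0 = 128258 then
      PySem.List.slice snac_tokens none (some (-1))
    else snac_tokens
  let frames : Nat := toks.length / 7
  let toks : List Int := PySem.List.slice toks none (some ((frames * 7 : Nat) : Int))
  if frames = 0 then [[], [], []]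
  else
    let r := (PySem.List.pyRange 0 (frames : Int)).foldl
      (fun (s : List Int × List Int × List Int) (i : Int) =>
        let slots := PySem.List.slice toks (some (i * 7)) (some ((i + 1) * 7))
        (s.1 ++ [PySem.Int.mod (PySem.List.pyGetD slots 0 0 - 128266) 4096],
         s.2.1 ++ [PySem.Int.mod (PySem.List.pyGetD slots 1 0 - 128266) 4096,
                   PySem.Int.mod (PySem.List.pyGetD slots 4 0 - 128266) 4096],
         s.2.2 ++ [PySem.Int.mod (PySem.List.pyGetD slots 2 0 - 128266) 4096,
                   PySem.Int.mod (PySem.List.pyGetD slots 3 0 - 128266) 4096,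
                   PySem.Int.mod (PySem.List.pyGetD slots 5 0 - 128266) 4096,
                   PySem.Int.mod (PySem.List.pyGetD slots 6 0 - 128266) 4096]))
      ([], [], [])
    [r.1, r.2.1, r.2.2]

-- ===== PORT B =====
-- hand port of the strided slice xs[k::7] (applied after `drop k`): take one element,
-- skip six; exact for a nonnegative start and step 7.
def pvEvery7 : List Int → List Int
  | [] => []
  | x :: rest => x :: pvEvery7 (rest.drop 6)
  termination_by xs => xs.length
  decreasing_by simp

def unpack_snac_from_7_alt (snac_tokens : List Int) : List (List Int) :=
  let toks : List Int :=
    if snac_tokens ≠ [] ∧ PySem.List.pyGetD snac_tokens (-1) 0 = 128258 then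
      PySem.List.slice snac_tokens none (some (-1))
    else snac_tokens
  let frames : Nat := toks.length / 7
  let codes : List Int :=
    (PySem.List.slice toks none (some ((frames * 7 : Nat) : Int))).map
      (fun t => PySem.Int.mod (t - 128266) 4096)
  let l1 := pvEvery7 codes
  let l2 := ((pvEvery7 (codes.drop 1)).zip (pvEvery7 (codes.drop 4))).flatMap
      (fun p => [p.1, p.2])
  let l3 := ((pvEvery7 (codes.drop 2)).zip ((pvEvery7 (codes.drop 3)).zip
      ((pvEvery7 (codes.drop 5)).zip (pvEvery7 (codes.drop 6))))).flatMap
      (fun q => [q.1, q.2.1, q.2.2.1, q.2.2.2])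
  [l1, l2, l3]

-- ===== PRECONDITION & SPEC =====
def Spec_unpack_snac_from_7 (snac_tokens : List Int) (out : List (List Int)) : Prop := out = unpack_snac_from_7_alt snac_tokens
instance (snac_tokens : List Int) (out : List (List Int)) : Decidable (Spec_unpack_snac_from_7 snac_tokens out) := by unfold Spec_unpack_snac_from_7; infer_instance

-- ===== CLAIM (what is proved, stated in full; the proofs are below) =====
def Claim_equal_unpack_snac_from_7 : Prop := ∀ (snac_tokens : List Int), Dom_unpack_snac_from_7 snac_tokens → Spec_unpack_snac_from_7 snac_tokens (unpack_snac_from_7 snac_tokens)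

-- ===== LEMMAS AND PROOFS =====

-- the per-token transform shared by both programs
def pvF (t : Int) : Int := PySem.Int.mod (t - 128266) 4096

theorem pvEvery7_nil : pvEvery7 [] = [] := by rw [pvEvery7.eq_def]

theorem pvEvery7_cons (x : Int) (rest : List Int) :
    pvEvery7 (x :: rest) = x :: pvEvery7 (rest.drop 6) := by rw [pvEvery7.eq_def]

-- the strided extraction, characterised by indices 7*i + k
theorem pvEvery7_drop_eq_map (n : Nat) :
    ∀ (cs : List Int) (k : Nat), cs.length = 7 * n → k < 7 →
      pvEvery7 (cs.drop k) = (List.range n).map (fun i => cs.getD (7 * i + k) 0) := by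
  induction n with
  | zero =>
      intro cs k h _
      have hnil : cs = [] := List.eq_nil_of_length_eq_zero (by omega)
      subst hnil; simp [pvEvery7_nil]
  | succ n ih =>
      intro cs k h hk
      have hklen : k < cs.length := by omega
      rw [List.drop_eq_getElem_cons hklen, pvEvery7_cons]
      have hdd : (cs.drop (k + 1)).drop 6 = (cs.drop 7).drop k := by
        rw [List.drop_drop, List.drop_drop]; ring_nf
      rw [hdd, ih (cs.drop 7) k (by simp; omega) hk]
      rw [List.range_succ_eq_map]
      simp only [List.map_cons, List.map_map]
      refine congrArg₂ List.cons ?_ ?_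
      · rw [List.getD_eq_getElem cs 0 (by omega)]
        congr 1; omega
      · apply List.map_congr_left
        intro i _
        simp only [Function.comp, Nat.succ_eq_add_one]
        rw [List.getD_eq_getElem?_getD, List.getD_eq_getElem?_getD, List.getElem?_drop]
        congr 2; omega

-- indexing a mapped list inside the range of indices
theorem pvGetD_map_pvF (t : List Int) (m : Nat) (h : m < t.length) :
    (t.map pvF).getD m 0 = pvF (t.getD m 0) := by
  rw [List.getD_eq_getElem _ _ (by simpa using h), List.getD_eq_getElem _ _ h,
      List.getElem_map]

-- slot j of frame m of a (7*n)-token list is token 7*m + j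
theorem pvSlot_eq (t : List Int) (n m : Nat) (j : Int) (_h : t.length = 7 * n) (_hm : m < n)
    (hj0 : 0 ≤ j) (hj : j < 7) :
    PySem.List.pyGetD (PySem.List.slice t (some ((m : Int) * 7)) (some (((m : Int) + 1) * 7))) j 0
      = t.getD (7 * m + j.toNat) 0 := by
  have h1 : ((m : Int) * 7) = ((m * 7 : Nat) : Int) := by push_cast; ring
  have h2 : (((m : Int) + 1) * 7) = ((m * 7 : Nat) : Int) + ((7 : Nat) : Int) := by push_cast; ring
  have hjn : j = ((j.toNat : Nat) : Int) := by omega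
  rw [h1, h2, PySem.List.slice_natCast_add, hjn, PySem.List.pyGetD_natCast]
  rw [List.getD_eq_getElem?_getD, List.getD_eq_getElem?_getD,
      List.getElem?_take_of_lt (by omega), List.getElem?_drop]
  congr 2; omega

-- ===== VERDICT (by name: the statement is the Claim_ definition above) =====
theorem unpack_snac_from_7_spec : Claim_equal_unpack_snac_from_7 := by
  intro snac_tokens _
  unfold Spec_unpack_snac_from_7 unpack_snac_from_7 unpack_snac_from_7_alt
  dsimp only
  set toks0 : List Int :=
    if snac_tokens ≠ [] ∧ PySem.List.pyGetD snac_tokens (-1) 0 = 128258 then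
      PySem.List.slice snac_tokens none (some (-1))
    else snac_tokens with htoks0
  set n : Nat := toks0.length / 7 with hn
  set t : List Int := PySem.List.slice toks0 none (some ((n * 7 : Nat) : Int)) with ht
  have hlen : t.length = 7 * n := by
    rw [ht, PySem.List.slice_to_natCast, List.length_take]
    omega
  rcases Nat.eq_zero_or_pos n with h0 | hpos
  · have htnil : t = [] := List.eq_nil_of_length_eq_zero (by omega)
    rw [if_pos h0, htnil]
    simp [pvEvery7_nil]
  · rw [if_neg (by omega)]
    -- canonical per-column functions
    have hA :
        (PySem.List.pyRange 0 (n : Int)).foldl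
          (fun (s : List Int × List Int × List Int) (i : Int) =>
            let slots := PySem.List.slice t (some (i * 7)) (some ((i + 1) * 7))
            (s.1 ++ [PySem.Int.mod (PySem.List.pyGetD slots 0 0 - 128266) 4096],
             s.2.1 ++ [PySem.Int.mod (PySem.List.pyGetD slots 1 0 - 128266) 4096,
                       PySem.Int.mod (PySem.List.pyGetD slots 4 0 - 128266) 4096],
             s.2.2 ++ [PySem.Int.mod (PySem.List.pyGetD slots 2 0 - 128266) 4096,
                       PySem.Int.mod (PySem.List.pyGetD slots 3 0 - 128266) 4096,
                       PySem.Int.mod (PySem.List.pyGetD slots 5 0 - 128266) 4096,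
                       PySem.Int.mod (PySem.List.pyGetD slots 6 0 - 128266) 4096]))
          ([], [], [])
        = ((List.range n).map (fun i => pvF (t.getD (7 * i + 0) 0)),
           (List.range n).flatMap (fun i => [pvF (t.getD (7 * i + 1) 0), pvF (t.getD (7 * i + 4) 0)]),
           (List.range n).flatMap (fun i => [pvF (t.getD (7 * i + 2) 0), pvF (t.getD (7 * i + 3) 0),
                                             pvF (t.getD (7 * i + 5) 0), pvF (t.getD (7 * i + 6) 0)])) := by
      rw [PySem.List.pyRange_zero_natCast, List.foldl_map]
      refine Eq.trans
        (PySem.List.foldl_prod_mk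
          (fun (a : List Int) (i : Nat) =>
            a ++ [PySem.Int.mod (PySem.List.pyGetD (PySem.List.slice t (some ((i : Int) * 7)) (some (((i : Int) + 1) * 7))) 0 0 - 128266) 4096])
          (fun (b : List Int × List Int) (i : Nat) =>
            (b.1 ++ [PySem.Int.mod (PySem.List.pyGetD (PySem.List.slice t (some ((i : Int) * 7)) (some (((i : Int) + 1) * 7))) 1 0 - 128266) 4096,
                     PySem.Int.mod (PySem.List.pyGetD (PySem.List.slice t (some ((i : Int) * 7)) (some (((i : Int) + 1) * 7))) 4 0 - 128266) 4096],
             b.2 ++ [PySem.Int.mod (PySem.List.pyGetD (PySem.List.slice t (some ((i : Int) * 7)) (some (((i : Int) + 1) * 7))) 2 0 - 128266) 4096,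
                     PySem.Int.mod (PySem.List.pyGetD (PySem.List.slice t (some ((i : Int) * 7)) (some (((i : Int) + 1) * 7))) 3 0 - 128266) 4096,
                     PySem.Int.mod (PySem.List.pyGetD (PySem.List.slice t (some ((i : Int) * 7)) (some (((i : Int) + 1) * 7))) 5 0 - 128266) 4096,
                     PySem.Int.mod (PySem.List.pyGetD (PySem.List.slice t (some ((i : Int) * 7)) (some (((i : Int) + 1) * 7))) 6 0 - 128266) 4096]))
          (List.range n) [] ([], [])) ?_
      refine congrArg₂ Prod.mk ?_ (Eq.trans
        (PySem.List.foldl_prod_mk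
          (fun (b1 : List Int) (i : Nat) =>
            b1 ++ [PySem.Int.mod (PySem.List.pyGetD (PySem.List.slice t (some ((i : Int) * 7)) (some (((i : Int) + 1) * 7))) 1 0 - 128266) 4096,
                   PySem.Int.mod (PySem.List.pyGetD (PySem.List.slice t (some ((i : Int) * 7)) (some (((i : Int) + 1) * 7))) 4 0 - 128266) 4096])
          (fun (b2 : List Int) (i : Nat) =>
            b2 ++ [PySem.Int.mod (PySem.List.pyGetD (PySem.List.slice t (some ((i : Int) * 7)) (some (((i : Int) + 1) * 7))) 2 0 - 128266) 4096,
                   PySem.Int.mod (PySem.List.pyGetD (PySem.List.slice t (some ((i : Int) * 7)) (some (((i : Int) + 1) * 7))) 3 0 - 128266) 4096,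
                   PySem.Int.mod (PySem.List.pyGetD (PySem.List.slice t (some ((i : Int) * 7)) (some (((i : Int) + 1) * 7))) 5 0 - 128266) 4096,
                   PySem.Int.mod (PySem.List.pyGetD (PySem.List.slice t (some ((i : Int) * 7)) (some (((i : Int) + 1) * 7))) 6 0 - 128266) 4096])
          (List.range n) [] []) (congrArg₂ Prod.mk ?_ ?_))
      · rw [PySem.List.foldl_append_singleton_eq_map, List.nil_append]
        refine List.map_congr_left (fun m hm => ?_)
        have hmn : m < n := List.mem_range.mp hm
        rw [pvSlot_eq t n m 0 hlen hmn (by omega) (by omega)]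
        rfl
      · refine Eq.trans (PySem.List.foldl_append_eq_flatMap
          (fun (i : Nat) => [PySem.Int.mod (PySem.List.pyGetD (PySem.List.slice t (some ((i : Int) * 7)) (some (((i : Int) + 1) * 7))) 1 0 - 128266) 4096,
                             PySem.Int.mod (PySem.List.pyGetD (PySem.List.slice t (some ((i : Int) * 7)) (some (((i : Int) + 1) * 7))) 4 0 - 128266) 4096])
          (List.range n) []) ?_
        rw [List.nil_append]
        refine List.flatMap_congr (fun m hm => ?_)
        have hmn : m < n := List.mem_range.mp hm
        rw [pvSlot_eq t n m 1 hlen hmn (by omega) (by omega),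
            pvSlot_eq t n m 4 hlen hmn (by omega) (by omega)]
        rfl
      · refine Eq.trans (PySem.List.foldl_append_eq_flatMap
          (fun (i : Nat) => [PySem.Int.mod (PySem.List.pyGetD (PySem.List.slice t (some ((i : Int) * 7)) (some (((i : Int) + 1) * 7))) 2 0 - 128266) 4096,
                             PySem.Int.mod (PySem.List.pyGetD (PySem.List.slice t (some ((i : Int) * 7)) (some (((i : Int) + 1) * 7))) 3 0 - 128266) 4096,
                             PySem.Int.mod (PySem.List.pyGetD (PySem.List.slice t (some ((i : Int) * 7)) (some (((i : Int) + 1) * 7))) 5 0 - 128266) 4096,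
                             PySem.Int.mod (PySem.List.pyGetD (PySem.List.slice t (some ((i : Int) * 7)) (some (((i : Int) + 1) * 7))) 6 0 - 128266) 4096])
          (List.range n) []) ?_
        rw [List.nil_append]
        refine List.flatMap_congr (fun m hm => ?_)
        have hmn : m < n := List.mem_range.mp hm
        rw [pvSlot_eq t n m 2 hlen hmn (by omega) (by omega),
            pvSlot_eq t n m 3 hlen hmn (by omega) (by omega),
            pvSlot_eq t n m 5 hlen hmn (by omega) (by omega),
            pvSlot_eq t n m 6 hlen hmn (by omega) (by omega)]
        rfl
    rw [hA]
    -- B side: each strided column is the same map over the frame indices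
    have hclen : (t.map pvF).length = 7 * n := by simpa using hlen
    have hcol : ∀ k : Nat, k < 7 →
        pvEvery7 ((t.map pvF).drop k) = (List.range n).map (fun i => pvF (t.getD (7 * i + k) 0)) := by
      intro k hk
      rw [pvEvery7_drop_eq_map n (t.map pvF) k hclen hk]
      refine List.map_congr_left (fun i hi => ?_)
      exact pvGetD_map_pvF t (7 * i + k) (by have := List.mem_range.mp hi; omega)
    have hcodes : (t.map (fun x => PySem.Int.mod (x - 128266) 4096)) = t.map pvF := rfl
    rw [hcodes]
    have hc0 := hcol 0 (by omega)
    rw [List.drop_zero] at hc0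
    rw [hc0, hcol 1 (by omega), hcol 2 (by omega), hcol 3 (by omega), hcol 4 (by omega),
        hcol 5 (by omega), hcol 6 (by omega)]
    simp only [List.zip_map', List.flatMap_map]
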